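-- pv_equiv track=rewrite | github.com/QureGenAI-Biotech/TyxonQ | src/tyxonq/libs/quantum_library/kernels/pauli.py | ps2xyz
-- ===== SOURCE A (Python) =====
-- from typing import Dict, List, Optional, Sequence, Tuple
--
-- def ps2xyz(ps: List[int]) -> Dict[str, List[int]]:
--     """Convert a Pauli string list to xyz dict.
--
--     ps[i] in {0,1,2,3} encodes I,X,Y,Z respectively.
--     Returns dict with keys "x","y","z" mapping to index lists.
--     """
--     xyz: Dict[str, List[int]] = {"x": [], "y": [], "z": []}
--     for i, v in enumerate(ps):
--         if v == 1:
--             xyz["x"].append(i)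
--         elif v == 2:
--             xyz["y"].append(i)
--         elif v == 3:
--             xyz["z"].append(i)
--     return xyz
-- ===== SOURCE B (Python) =====
-- from typing import Dict, List
--
-- def ps2xyz(ps: List[int]) -> Dict[str, List[int]]:
--     """Convert a Pauli string list to xyz dict (three independent filtering scans)."""
--     return {
--         "x": [i for i, v in enumerate(ps) if v == 1],
--         "y": [i for i, v in enumerate(ps) if v == 2],
--         "z": [i for i, v in enumerate(ps) if v == 3],
--     }
-- ===== Notes on version B (the rewrite author's own statement) =====
-- stated objective: idiomatic
-- what changed: Replaces the single stateful enumerate loop that appends into a pre-built dict with three independent list comprehensions, one filtering scan per key, assembled directly into a dict literal.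
import Mathlib
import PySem

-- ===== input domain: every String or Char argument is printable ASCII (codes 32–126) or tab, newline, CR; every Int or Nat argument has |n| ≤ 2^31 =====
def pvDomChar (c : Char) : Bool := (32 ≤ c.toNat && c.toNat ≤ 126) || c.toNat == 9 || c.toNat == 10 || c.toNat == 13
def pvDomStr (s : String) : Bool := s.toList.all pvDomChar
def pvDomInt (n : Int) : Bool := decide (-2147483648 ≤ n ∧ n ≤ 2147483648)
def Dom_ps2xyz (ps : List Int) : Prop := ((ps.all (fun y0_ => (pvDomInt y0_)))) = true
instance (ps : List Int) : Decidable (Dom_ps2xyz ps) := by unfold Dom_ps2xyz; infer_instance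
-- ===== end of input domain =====

-- B replaces A's single stateful enumerate loop with three independent filtering scans (idiomatic decomposition; same cost).

-- ===== PORT A =====
-- A: xyz = {"x": [], "y": [], "z": []}; for i, v in enumerate(ps): append i to the matching key.
def ps2xyzStep (d : PySem.Dict String (List Int)) (p : Int × Int) : PySem.Dict String (List Int) :=
  if p.2 == 1 then d.modify "x" [] (· ++ [p.1])
  else if p.2 == 2 then d.modify "y" [] (· ++ [p.1])
  else if p.2 == 3 then d.modify "z" [] (· ++ [p.1])
  else d

def ps2xyz (ps : List Int) : List (String × List Int) :=
  ((PySem.List.enumerate ps).foldl ps2xyzStep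
    (PySem.Dict.ofList [("x", []), ("y", []), ("z", [])])).items

-- ===== PORT B =====
-- B: three independent comprehensions over enumerate(ps), one per key.
def ps2xyz_alt (ps : List Int) : List (String × List Int) :=
  [ ("x", (PySem.List.enumerate ps).filterMap (fun p => if p.2 == 1 then some p.1 else none)),
    ("y", (PySem.List.enumerate ps).filterMap (fun p => if p.2 == 2 then some p.1 else none)),
    ("z", (PySem.List.enumerate ps).filterMap (fun p => if p.2 == 3 then some p.1 else none)) ]

-- ===== PRECONDITION & SPEC =====
def Spec_ps2xyz (ps : List Int) (out : List (String × List Int)) : Prop := out = ps2xyz_alt ps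
instance (ps : List Int) (out : List (String × List Int)) : Decidable (Spec_ps2xyz ps out) := by unfold Spec_ps2xyz; infer_instance

-- ===== CLAIM (what is proved, stated in full; the proofs are below) =====
def Claim_equal_ps2xyz : Prop := ∀ (ps : List Int), Dom_ps2xyz ps → Spec_ps2xyz ps (ps2xyz ps)

-- ===== LEMMAS AND PROOFS =====

-- Loop invariant: folding A's step over any pair list l from a literal three-key dict
-- appends exactly B's three filtered index lists to the respective entries.
theorem ps2xyz_fold_inv (l : List (Int × Int)) :
    ∀ (a b c : List Int),
      ((l.foldl ps2xyzStep (PySem.Dict.mk [("x", a), ("y", b), ("z", c)])).items) =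
      [ ("x", a ++ l.filterMap (fun p => if p.2 == 1 then some p.1 else none)),
        ("y", b ++ l.filterMap (fun p => if p.2 == 2 then some p.1 else none)),
        ("z", c ++ l.filterMap (fun p => if p.2 == 3 then some p.1 else none)) ] := by
  induction l with
  | nil => intro a b c; simp
  | cons p t ih =>
    intro a b c
    by_cases h1 : p.2 = 1
    · simpa [ps2xyzStep, h1, PySem.Dict.modify, PySem.Dict.contains, PySem.Dict.get?,
        PySem.Dict.insert, PySem.Dict.items] using ih (a ++ [p.1]) b c
    · by_cases h2 : p.2 = 2
      · simpa [ps2xyzStep, h1, h2, PySem.Dict.modify, PySem.Dict.contains, PySem.Dict.get?,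
          PySem.Dict.insert, PySem.Dict.items] using ih a (b ++ [p.1]) c
      · by_cases h3 : p.2 = 3
        · simpa [ps2xyzStep, h1, h2, h3, PySem.Dict.modify, PySem.Dict.contains, PySem.Dict.get?,
            PySem.Dict.insert, PySem.Dict.items] using ih a b (c ++ [p.1])
        · simpa [ps2xyzStep, h1, h2, h3] using ih a b c

-- ===== VERDICT (by name: the statement is the Claim_ definition above) =====
theorem ps2xyz_spec : Claim_equal_ps2xyz := by
  intro ps _
  unfold Spec_ps2xyz ps2xyz ps2xyz_alt
  simpa [PySem.Dict.ofList] using ps2xyz_fold_inv (PySem.List.enumerate ps) [] [] []
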